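-- pv_equiv track=rewrite | github.com/mohi-othman/mohi-euler-python | ProjectEuler/ProjectEuler/Euler080.py | longRoot
-- ===== SOURCE A (Python) =====
-- import math
--
-- def longRoot(n, precision):
--     result = '0'
--     c= 0
--     number = str(n)
--     if len(str(math.floor(n))) % 2 != 0:
--         number = '0' + number
--
--     while len(result)<=precision+3:
--         if len(number)>0:
--             c = c * 100 + int(number[:2])
--         else:
--             c = c * 100
--
--         for x in range(9,-1,-1):
--             y = (20 * int(result) + x) * x
--             if y<=c:
--                 result += str(x)
--                 c -= y
--                 if len(number)>0:
--                     number = number[2:]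
--
--                 break
--
--     return result[1:]
-- ===== SOURCE B (Python) =====
-- def _isqrt(N):
--     # floor square root by binary digit-doubling: halve N two bits at a time,
--     # then rebuild the root one binary digit per level
--     shifts = []
--     m = N
--     while m >= 2:
--         shifts.append(m)
--         m >>= 2
--     r = m
--     for v in reversed(shifts):
--         r <<= 1
--         if (r + 1) * (r + 1) <= v:
--             r += 1
--     return r
--
--
-- def longRoot(n, precision):
--     d = precision + 3
--     if d < 1:
--         return ''
--     digits = len(str(n))
--     half = (digits + 1) // 2
--     if d >= half:
--         N = n * 100 ** (d - half)
--     else: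
--         N = n // 100 ** (half - d)
--     return str(_isqrt(N)).zfill(d)
-- ===== Notes on version B (the rewrite author's own statement) =====
-- stated objective: alternative
-- what changed: B replaces A's digit-by-digit root extraction over a growing result string (which re-parses the whole result with int() for every candidate digit) by one integer square root of the suitably scaled number n*100^k, computed with a binary digit-doubling isqrt loop, and then zero-pads the decimal representation.
import Mathlib
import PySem

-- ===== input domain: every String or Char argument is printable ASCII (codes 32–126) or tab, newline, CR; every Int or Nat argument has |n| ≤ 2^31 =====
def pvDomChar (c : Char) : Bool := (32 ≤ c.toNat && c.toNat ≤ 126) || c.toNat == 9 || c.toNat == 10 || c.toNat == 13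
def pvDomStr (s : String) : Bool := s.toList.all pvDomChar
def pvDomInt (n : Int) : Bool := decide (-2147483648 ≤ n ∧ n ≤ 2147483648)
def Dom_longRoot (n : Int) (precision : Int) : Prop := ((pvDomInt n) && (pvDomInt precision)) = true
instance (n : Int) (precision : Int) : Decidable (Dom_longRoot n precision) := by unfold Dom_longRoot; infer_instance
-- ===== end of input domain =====

-- B replaces A's digit-by-digit root extraction by one integer square root of the scaled
-- number, computed with a binary digit-doubling isqrt loop; equivalence is proved on
-- Pre_ (0 ≤ n, or a precision small enough that the loop never runs).

-- ===== PORT A =====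

-- int(s) for the strings this program feeds to int(): nonempty strings of decimal
-- digits (the result string '0…' and two-digit slices of str(n) for n ≥ 0).
-- Ported by hand as the standard fold; exact on that domain (no sign/space/underscore
-- ever reaches it under Pre_).
def pvDigitsVal (cs : List Char) : Int :=
  cs.foldl (fun a c => a * 10 + ((c.toNat : Int) - 48)) 0

-- the 'for x in range(9,-1,-1)' body: returns the post-break state, none = no break
def pvInnerForA : List Int → List Char → Int → List Char → Option (List Char × Int × List Char)
  | [], _, _, _ => none
  | x :: xs, result, c, number =>
    let y := (20 * pvDigitsVal result + x) * x
    if y ≤ c then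
      some (result ++ PySem.Int.toChars x, c - y,
            if 0 < number.length then PySem.List.slice number (some 2) none else number)
    else pvInnerForA xs result c number

-- the while loop; fuel = (precision+3).toNat, one unit per iteration (under Pre_
-- every iteration appends exactly one digit, so this fuel is exact)
def pvLoopA : Nat → List Char → Int → List Char → Int → List Char
  | 0, result, _, _, _ => result
  | f + 1, result, c, number, precision =>
    if (result.length : Int) ≤ precision + 3 then
      let c' := if 0 < number.length
                then c * 100 + pvDigitsVal (PySem.List.slice number none (some 2))
                else c * 100
      match pvInnerForA (PySem.List.pyRange 9 (-1) (-1)) result c' number with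
      | some (r', c'', nb) => pvLoopA f r' c'' nb precision
      | none => pvLoopA f result c' number precision
    else result

def longRoot (n : Int) (precision : Int) : String :=
  -- math.floor(n) = n for an int argument, so str(math.floor(n)) = str(n)
  let number := PySem.Int.toChars n
  let number := if (PySem.Int.toChars n).length % 2 ≠ 0 then '0' :: number else number
  -- result[1:] on a nonempty string is drop 1 (PySem.List.slice_from_one)
  String.ofList ((pvLoopA (precision + 3).toNat ['0'] 0 number precision).drop 1)

-- ===== PORT B =====

-- loop body of the 'for v in reversed(shifts)' loop of Source B
def pvIsqrtStep (r v : Int) : Int :=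
  let r2 := r <<< (1 : Nat)
  if (r2 + 1) * (r2 + 1) ≤ v then r2 + 1 else r2

-- the 'while m >= 2' loop of Source B: the list of saved values and the final m
def pvShiftsB (m : Int) : List Int × Int :=
  if h : 2 ≤ m then
    let p := pvShiftsB (m >>> (2 : Nat))
    (m :: p.1, p.2)
  else ([], m)
termination_by m.toNat
decreasing_by
  have h4 : m >>> (2 : Nat) = m / 4 := by
    have := Int.shiftRight_eq_div_pow m 2
    norm_num at this
    exact this
  rw [h4]; omega

def pvIsqrtB (N : Int) : Int :=
  let p := pvShiftsB N
  p.1.reverse.foldl pvIsqrtStep p.2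

def longRoot_alt (n : Int) (precision : Int) : String :=
  let d := precision + 3
  if d < 1 then "" else
    let digits := PySem.Str.len (PySem.Int.toStr n)
    let half := PySem.Int.floordiv (digits + 1) 2
    let N := if half ≤ d then n * 100 ^ (d - half).toNat
             else PySem.Int.floordiv n (100 ^ (half - d).toNat)
    PySem.Str.zfill (PySem.Int.toStr (pvIsqrtB N)) d

-- ===== PRECONDITION & SPEC =====

-- Pre_ excludes n < 0 whenever precision+3 ≥ 1: there the while loop of A never
-- breaks out of its digit search (c stays negative) and A loops forever.
def Pre_longRoot (n : Int) (precision : Int) : Prop := 0 ≤ n ∨ precision + 3 < 1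
instance (n : Int) (precision : Int) : Decidable (Pre_longRoot n precision) := by
  unfold Pre_longRoot; infer_instance

def pvWitness_longRoot : Int × Int := (2, 5)

def Spec_longRoot (n : Int) (precision : Int) (out : String) : Prop := out = longRoot_alt n precision
instance (n : Int) (precision : Int) (out : String) : Decidable (Spec_longRoot n precision out) := by
  unfold Spec_longRoot; infer_instance

-- ===== CLAIM (what is proved, stated in full; the proofs are below) =====
def Claim_equal_longRoot : Prop := ∀ (n : Int) (precision : Int), Dom_longRoot n precision → Pre_longRoot n precision → Spec_longRoot n precision (longRoot n precision)

-- ===== LEMMAS AND PROOFS =====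

-- v written with exactly k decimal digits (zero-padded); [] for k = 0
def padK : Nat → Nat → List Char
  | 0, _ => []
  | k + 1, v => padK k (v / 10) ++ [Nat.digitChar (v % 10)]

theorem padK_length (k v : Nat) : (padK k v).length = k := by
  induction k generalizing v with
  | zero => rfl
  | succ k ih => simp [padK, ih]

theorem padK_zero (k : Nat) : padK k 0 = List.replicate k '0' := by
  induction k with
  | zero => rfl
  | succ k ih => simp [padK, ih, List.replicate_succ', Nat.digitChar]

theorem padK_digit (k v x : Nat) (hx : x < 10) :
    padK (k + 1) (10 * v + x) = padK k v ++ [Nat.digitChar x] := by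
  have h1 : (10 * v + x) / 10 = v := by omega
  have h2 : (10 * v + x) % 10 = x := by omega
  simp [padK, h1, h2]

theorem padK_split (a b v : Nat) :
    padK (a + b) v = padK a (v / 10 ^ b) ++ padK b (v % 10 ^ b) := by
  induction b generalizing v with
  | zero => simp [padK]
  | succ b ih =>
      have : a + (b + 1) = (a + b) + 1 := by omega
      rw [this]
      show padK ((a+b)+1) v = _
      rw [padK, ih]
      have h1 : v / 10 / 10 ^ b = v / 10 ^ (b + 1) := by
        rw [Nat.div_div_eq_div_mul, pow_succ, mul_comm (10^b) 10]
      have h2 : v / 10 % 10 ^ b = v % 10 ^ (b + 1) / 10 := by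
        rw [pow_succ, mul_comm (10^b) 10, Nat.mod_mul_right_div_self]
      have h3 : v % 10 = v % 10 ^ (b + 1) % 10 := by
        rw [Nat.mod_mod_of_dvd]
        exact ⟨10 ^ b, by rw [pow_succ]; ring⟩
      rw [h1, h2, h3, padK]
      simp

theorem digitChar_val (x : Nat) (hx : x < 10) :
    ((Nat.digitChar x).toNat : Int) - 48 = x := by
  interval_cases x <;> decide

theorem foldl_padK (k : Nat) : ∀ (v : Nat) (a : Int), v < 10 ^ k →
    (padK k v).foldl (fun a c => a * 10 + ((c.toNat : Int) - 48)) a = a * 10 ^ k + v := by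
  induction k with
  | zero => intro v a hv; interval_cases v; simp [padK]
  | succ k ih =>
      intro v a hv
      have hdiv : v / 10 < 10 ^ k := by
        rw [Nat.div_lt_iff_lt_mul (by norm_num)]
        calc v < 10 ^ (k+1) := hv
        _ = 10 ^ k * 10 := by rw [pow_succ]
      rw [padK, List.foldl_append, ih _ a hdiv]
      simp only [List.foldl_cons, List.foldl_nil]
      rw [digitChar_val _ (Nat.mod_lt _ (by norm_num))]
      have h1 : (v : Int) = 10 * ((v / 10 : Nat) : Int) + ((v % 10 : Nat) : Int) := by
        push_cast; omega
      rw [pow_succ, h1]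
      ring

theorem pvDigitsVal_padK (k v : Nat) (h : v < 10 ^ k) :
    pvDigitsVal (padK k v) = v := by
  unfold pvDigitsVal
  rw [foldl_padK k v 0 h]; ring

theorem pvDigitsVal_zero_padK (k v : Nat) (h : v < 10 ^ k) :
    pvDigitsVal ('0' :: padK k v) = v := by
  unfold pvDigitsVal
  simp only [List.foldl_cons]
  have h0 : (0 : Int) * 10 + ((('0'.toNat : Nat) : Int) - 48) = 0 := by decide
  rw [h0]
  have := pvDigitsVal_padK k v h
  unfold pvDigitsVal at this
  exact this

theorem length_toDigits_le (v k : Nat) (h1 : 0 < k) (h2 : v < 10 ^ k) :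
    (Nat.toDigits 10 v).length ≤ k :=
  (Nat.length_toDigits_le_iff (by norm_num) h1).2 h2

theorem toDigits_padK (k : Nat) : ∀ v, 1 ≤ k → v < 10 ^ k →
    padK k v = List.replicate (k - (Nat.toDigits 10 v).length) '0' ++ Nat.toDigits 10 v := by
  induction k with
  | zero => omega
  | succ k ih =>
      intro v _ hv
      by_cases hsmall : v < 10
      · have htd : Nat.toDigits 10 v = [Nat.digitChar v] := Nat.toDigits_of_lt_base hsmall
        have hd : v / 10 = 0 := Nat.div_eq_of_lt hsmall
        have hm : v % 10 = v := Nat.mod_eq_of_lt hsmall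
        rw [padK, hd, hm, padK_zero, htd]
        simp
      · have hk : 1 ≤ k := by
          by_contra hk
          have : k = 0 := by omega
          subst this; simp at hv; omega
        have hge : 10 ≤ v := by omega
        have htd : Nat.toDigits 10 v = Nat.toDigits 10 (v / 10) ++ [(v % 10).digitChar] :=
          Nat.toDigits_of_base_le (by norm_num) hge
        have hdiv : v / 10 < 10 ^ k := by
          rw [Nat.div_lt_iff_lt_mul (by norm_num)]
          calc v < 10 ^ (k+1) := hv
          _ = 10 ^ k * 10 := by rw [pow_succ]
        have hlen : (Nat.toDigits 10 (v / 10)).length ≤ k := length_toDigits_le _ _ hk hdiv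
        rw [padK, ih _ hk hdiv, htd]
        simp only [List.length_append, List.length_cons, List.length_nil]
        have : k + 1 - ((Nat.toDigits 10 (v / 10)).length + (0 + 1))
             = k - (Nat.toDigits 10 (v / 10)).length := by omega
        rw [this, List.append_assoc]

-- small integers printed: str(x) for 0 ≤ x < 10
theorem toChars_small (u : Nat) (hu : u < 10) :
    PySem.Int.toChars (u : Int) = [Nat.digitChar u] := by
  unfold PySem.Int.toChars
  rw [if_neg (by omega)]
  simp [Nat.toDigits_of_lt_base hu]

-- ==== the square-root digit step ====

theorem sqrt_pair_lower (N t : Nat) : 10 * Nat.sqrt N ≤ Nat.sqrt (100 * N + t) := by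
  rw [Nat.le_sqrt]
  nlinarith [Nat.sqrt_le' N]

theorem sqrt_pair_upper (N t : Nat) (ht : t < 100) :
    Nat.sqrt (100 * N + t) ≤ 10 * Nat.sqrt N + 9 := by
  have h := Nat.lt_succ_sqrt' N
  have : Nat.sqrt (100 * N + t) < 10 * Nat.sqrt N + 10 := by
    rw [Nat.sqrt_lt]
    nlinarith
  omega

theorem sqrt_lt_of_lt_sq (N k : Nat) (h : N < 100 ^ k) : Nat.sqrt N < 10 ^ k := by
  rw [Nat.sqrt_lt]
  calc N < 100 ^ k := h
  _ = 10 ^ k * 10 ^ k := by rw [show (100:ℕ) = 10 * 10 by norm_num, mul_pow]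

-- ==== the inner for loop: scanning a strictly descending list finds the
--      largest digit whose trial product fits ====

theorem pvInnerForA_find (l : List Int) (hdesc : l.Pairwise (· > ·)) :
    ∀ (result : List Char) (c : Int) (number : List Char) (x0 : Int), x0 ∈ l →
    ((20 * pvDigitsVal result + x0) * x0 ≤ c) →
    (∀ x ∈ l, x0 < x → ¬ ((20 * pvDigitsVal result + x) * x ≤ c)) →
    pvInnerForA l result c number =
      some (result ++ PySem.Int.toChars x0,
            c - (20 * pvDigitsVal result + x0) * x0,
            if 0 < number.length then PySem.List.slice number (some 2) none else number) := by
  induction l with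
  | nil => intro _ _ _ _ hmem; exact absurd hmem (List.not_mem_nil)
  | cons x xs ih =>
      intro result c number x0 hmem htrue hfalse
      rw [List.pairwise_cons] at hdesc
      by_cases hx : x = x0
      · subst hx
        simp only [pvInnerForA]
        rw [if_pos htrue]
      · have hmem' : x0 ∈ xs := by
          rcases List.mem_cons.1 hmem with h | h
          · exact absurd h.symm hx
          · exact h
        have hgt : x0 < x := hdesc.1 x0 hmem'
        simp only [pvInnerForA]
        rw [if_neg (hfalse x List.mem_cons_self hgt)]
        exact ih hdesc.2 result c number x0 hmem' htrue
          (fun z hz hgz => hfalse z (List.mem_cons_of_mem _ hz) hgz)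

theorem pvInnerForA_spec (result : List Char) (c : Int) (number : List Char)
    (x0 : Int) (h0 : 0 ≤ x0) (h9 : x0 ≤ 9)
    (hc : ∀ x : Int, 0 ≤ x → x ≤ 9 →
      ((20 * pvDigitsVal result + x) * x ≤ c ↔ x ≤ x0)) :
    pvInnerForA (PySem.List.pyRange 9 (-1) (-1)) result c number =
      some (result ++ PySem.Int.toChars x0,
            c - (20 * pvDigitsVal result + x0) * x0,
            if 0 < number.length then PySem.List.slice number (some 2) none else number) := by
  have hr : PySem.List.pyRange 9 (-1) (-1) = [9, 8, 7, 6, 5, 4, 3, 2, 1, 0] := by decide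
  rw [hr]
  apply pvInnerForA_find
  · decide
  · have : x0 ∈ ([9, 8, 7, 6, 5, 4, 3, 2, 1, 0] : List Int) := by
      interval_cases x0 <;> decide
    exact this
  · exact (hc x0 h0 h9).2 (le_refl x0)
  · intro x hxmem hgt
    have hx9 : x ≤ 9 ∧ 0 ≤ x := by
      fin_cases hxmem <;> norm_num
    rw [hc x hx9.2 hx9.1]
    omega

-- ==== the while loop invariant ====

-- value of the first k digit-pairs of the padded string, extended with 00-pairs
def NkFun (nn h : Nat) (k : Nat) : Nat :=
  if k ≤ h then nn / 100 ^ (h - k) else nn * 100 ^ (k - h)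

def pairT (nn h k : Nat) : Nat := if k < h then nn / 100 ^ (h - k - 1) % 100 else 0

theorem pairT_lt (nn h k : Nat) : pairT nn h k < 100 := by
  unfold pairT; split
  · exact Nat.mod_lt _ (by norm_num)
  · norm_num

theorem Nk_lt (nn h k : Nat) (hnn : nn < 100 ^ h) : NkFun nn h k < 100 ^ k := by
  unfold NkFun; split
  · rename_i hk
    rw [Nat.div_lt_iff_lt_mul (by positivity)]
    calc nn < 100 ^ h := hnn
    _ ≤ 100 ^ k * 100 ^ (h - k) := by rw [← pow_add]; exact Nat.pow_le_pow_right (by norm_num) (by omega)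
  · rename_i hk
    calc nn * 100 ^ (k - h) < 100 ^ h * 100 ^ (k - h) :=
      mul_lt_mul_of_pos_right hnn (by positivity)
    _ = 100 ^ k := by rw [← pow_add]; congr 1; omega

theorem Nk_succ (nn h k : Nat) : NkFun nn h (k + 1) = 100 * NkFun nn h k + pairT nn h k := by
  unfold NkFun pairT
  by_cases hk : k < h
  · rw [if_pos (by omega), if_pos (by omega), if_pos hk]
    have he : h - k = (h - k - 1) + 1 := by omega
    have h2 : nn / 100 ^ (h - k) = nn / 100 ^ (h - k - 1) / 100 := by
      rw [Nat.div_div_eq_div_mul, ← pow_succ, ← he]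
    rw [h2]
    have hh : h - (k+1) = h - k - 1 := by omega
    rw [hh]
    omega
  · rw [if_neg (by omega), if_neg hk]
    by_cases hkh : k ≤ h
    · have : k = h := by omega
      subst this
      simp [Nat.mul_comm]
    · rw [if_neg (by omega)]
      have : k + 1 - h = (k - h) + 1 := by omega
      rw [this, pow_succ]
      ring

theorem pow100_eq (m : Nat) : (100:ℕ) ^ m = 10 ^ (2 * m) := by
  rw [show (100:ℕ) = 10 ^ 2 by norm_num, ← pow_mul]

theorem pvLoopA_inv (p : Int) (nn h : Nat) (hnn : nn < 100 ^ h) (d : Nat)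
    (hd : (d : Int) = p + 3) :
    ∀ j k, j + k = d →
    pvLoopA j ('0' :: padK k (Nat.sqrt (NkFun nn h k)))
      ((NkFun nn h k : Int) - (Nat.sqrt (NkFun nn h k) : Int) ^ 2)
      (padK (2 * (h - k)) (nn % 100 ^ (h - k))) p
    = '0' :: padK d (Nat.sqrt (NkFun nn h d)) := by
  intro j
  induction j with
  | zero => intro k hk; have : k = d := by omega
            subst this; rfl
  | succ j ih =>
      intro k hk
      set N := NkFun nn h k with hN
      set r := Nat.sqrt N with hrdef
      set N' := NkFun nn h (k + 1) with hN'
      have hrk : r < 10 ^ k := sqrt_lt_of_lt_sq N k (Nk_lt nn h k hnn)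
      have hparse : pvDigitsVal ('0' :: padK k r) = r := pvDigitsVal_zero_padK k r hrk
      have hNsucc : N' = 100 * N + pairT nn h k := Nk_succ nn h k
      have ht : pairT nn h k < 100 := pairT_lt nn h k
      set s' := Nat.sqrt N' with hs'
      have hlow : 10 * r ≤ s' := by rw [hs', hNsucc]; exact sqrt_pair_lower N _
      have hhigh : s' ≤ 10 * r + 9 := by rw [hs', hNsucc]; exact sqrt_pair_upper N _ ht
      set x0 : Int := (s' : Int) - 10 * (r : Int) with hx0
      have hx00 : 0 ≤ x0 := by rw [hx0]; push_cast; omega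
      have hx09 : x0 ≤ 9 := by rw [hx0]; push_cast; omega
      simp only [pvLoopA]
      have hlen : ((('0' :: padK k r).length : Nat) : Int) ≤ p + 3 := by
        simp only [List.length_cons, padK_length]
        rw [← hd]; push_cast; omega
      rw [if_pos hlen]
      have hrest_len : (padK (2 * (h - k)) (nn % 100 ^ (h - k))).length = 2 * (h - k) :=
        padK_length _ _
      -- the fresh c equals N' - 100 r²
      have hc' : (if 0 < (padK (2 * (h - k)) (nn % 100 ^ (h - k))).length
            then ((N : Int) - (r : Int) ^ 2) * 100 +
                 pvDigitsVal (PySem.List.slice (padK (2 * (h - k)) (nn % 100 ^ (h - k))) none (some 2))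
            else ((N : Int) - (r : Int) ^ 2) * 100)
          = (N' : Int) - 100 * (r : Int) ^ 2 := by
        rw [hrest_len]
        by_cases hkh : k < h
        · rw [if_pos (by omega)]
          have hsplit : 2 * (h - k) = 2 + 2 * (h - k - 1) := by omega
          have hslice : PySem.List.slice (padK (2 * (h - k)) (nn % 100 ^ (h - k))) none (some 2)
              = List.take 2 (padK (2 * (h - k)) (nn % 100 ^ (h - k))) := by
            rw [PySem.List.slice_to _ (by norm_num)]
            rw [show ((2:ℤ)).toNat = 2 from rfl]
          rw [hslice, hsplit, padK_split]
          rw [List.take_append_of_le_length (padK_length _ _).ge]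
          rw [List.take_of_length_le (padK_length _ _).le]
          have hq : nn % 100 ^ (h - k) / 10 ^ (2 * (h - k - 1)) < 10 ^ 2 := by
            rw [Nat.div_lt_iff_lt_mul (by positivity)]
            calc nn % 100 ^ (h - k) < 100 ^ (h - k) := Nat.mod_lt _ (by positivity)
            _ = 10 ^ 2 * 10 ^ (2 * (h - k - 1)) := by
                  rw [pow100_eq, show 2 * (h - k) = 2 + 2 * (h - k - 1) from by omega, pow_add]
          rw [pvDigitsVal_padK _ _ hq]
          have hpair : nn % 100 ^ (h - k) / 10 ^ (2 * (h - k - 1)) = pairT nn h k := by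
            unfold pairT
            rw [if_pos hkh]
            have h100 : (100:ℕ) ^ (h - k) = 10 ^ (2 * (h - k - 1)) * 100 := by
              rw [pow100_eq, show (100:ℕ) = 10 ^ 2 by norm_num, ← pow_add]
              congr 1; omega
            have h100' : (100:ℕ) ^ (h - k - 1) = 10 ^ (2 * (h - k - 1)) := pow100_eq _
            rw [h100, Nat.mod_mul_right_div_self, h100']
          rw [hpair, hNsucc]
          push_cast
          ring
        · rw [if_neg (by omega)]
          have hz : pairT nn h k = 0 := by unfold pairT; rw [if_neg hkh]
          rw [hNsucc, hz]
          push_cast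
          ring
      simp only [hc']
      -- the inner for loop picks exactly the next root digit x0
      have hcond : ∀ x : Int, 0 ≤ x → x ≤ 9 →
          ((20 * pvDigitsVal ('0' :: padK k r) + x) * x ≤ (N' : Int) - 100 * (r : Int) ^ 2 ↔ x ≤ x0) := by
        intro x hx0' hx9'
        rw [hparse]
        have hiff : (20 * (r : Int) + x) * x ≤ (N' : Int) - 100 * (r : Int) ^ 2
            ↔ (10 * (r : Int) + x) ^ 2 ≤ (N' : Int) := by constructor <;> intro hh <;> nlinarith
        rw [hiff]
        constructor
        · intro hh
          have hu : x = ((x.toNat : ℕ) : ℤ) := (Int.toNat_of_nonneg hx0').symm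
          have hnatI : (((10 * r + x.toNat) ^ 2 : ℕ) : ℤ) ≤ ((N' : ℕ) : ℤ) := by
            push_cast
            rw [← hu]
            exact hh
          have hnat : (10 * r + x.toNat) ^ 2 ≤ N' := by exact_mod_cast hnatI
          have hfit : 10 * r + x.toNat ≤ s' := by
            rw [hs', Nat.le_sqrt, ← pow_two]
            exact hnat
          omega
        · intro hh
          have hle : (10 * (r:Int) + x) ≤ (s' : Int) := by rw [hx0] at hh; omega
          have h0le : (0:Int) ≤ 10 * (r:Int) + x := by positivity
          have hs2 : ((s':Int)) ^ 2 ≤ (N' : Int) := by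
            have h1 := Nat.sqrt_le' N'
            rw [← hs'] at h1
            exact_mod_cast h1
          calc (10 * (r:Int) + x) ^ 2 ≤ ((s':Int)) ^ 2 := by
                nlinarith [hle, h0le]
          _ ≤ (N' : Int) := hs2
      rw [pvInnerForA_spec _ _ _ x0 hx00 hx09 hcond]
      -- reduce the match on `some`
      simp only []
      -- new result string
      have hx0nat : x0 = ((s' - 10 * r : Nat) : Int) := by rw [hx0]; push_cast; omega
      have hxlt : s' - 10 * r < 10 := by omega
      have hres : '0' :: padK k r ++ PySem.Int.toChars x0 = '0' :: padK (k + 1) s' := by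
        rw [hx0nat, toChars_small _ hxlt]
        have hsplit : s' = 10 * r + (s' - 10 * r) := by omega
        rw [hsplit, padK_digit k r _ hxlt]
        simp
      -- new c
      have hcnew : (N' : Int) - 100 * (r : Int) ^ 2 - (20 * pvDigitsVal ('0' :: padK k r) + x0) * x0
          = (N' : Int) - (s' : Int) ^ 2 := by
        rw [hparse, hx0]
        ring
      -- new number
      have hnb : (if 0 < (padK (2 * (h - k)) (nn % 100 ^ (h - k))).length
            then PySem.List.slice (padK (2 * (h - k)) (nn % 100 ^ (h - k))) (some 2) none
            else padK (2 * (h - k)) (nn % 100 ^ (h - k)))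
          = padK (2 * (h - (k + 1))) (nn % 100 ^ (h - (k + 1))) := by
        rw [hrest_len]
        by_cases hkh : k < h
        · rw [if_pos (by omega)]
          rw [PySem.List.slice_from _ (by norm_num)]
          have hsplit : 2 * (h - k) = 2 + 2 * (h - k - 1) := by omega
          rw [hsplit, padK_split]
          rw [show ((2:ℤ)).toNat = 2 from rfl]
          rw [List.drop_append_of_le_length (padK_length _ _).ge]
          rw [List.drop_of_length_le (padK_length _ _).le, List.nil_append]
          have h1 : h - (k + 1) = h - k - 1 := by omega
          have h2 : nn % 100 ^ (h - k) % 10 ^ (2 * (h - k - 1)) = nn % 100 ^ (h - k - 1) := by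
            rw [← pow100_eq, Nat.mod_mod_of_dvd]
            exact pow_dvd_pow _ (by omega)
          rw [h1, h2]
        · rw [if_neg (by omega)]
          have h1 : h - k = 0 := by omega
          have h2 : h - (k + 1) = 0 := by omega
          rw [h1, h2]
      rw [hres, hcnew, hnb]
      exact ih (k + 1) (by omega)

-- ==== the assembled A side ====

theorem longRoot_eq_pad (n p : Int) (hn : 0 ≤ n) (hp : 0 ≤ p + 3) :
    longRoot n p = String.ofList (padK (p + 3).toNat
      (Nat.sqrt (NkFun n.toNat (((Nat.toDigits 10 n.toNat).length + 1) / 2) (p + 3).toNat))) := by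
  unfold longRoot
  set nn := n.toNat with hnn
  have hchars : PySem.Int.toChars n = Nat.toDigits 10 nn := by
    unfold PySem.Int.toChars
    rw [if_neg (by omega)]
  set len0 := (Nat.toDigits 10 nn).length with hlen0
  have hlpos : 0 < len0 := Nat.length_toDigits_pos
  set h := (len0 + 1) / 2 with hh
  have hnlt : nn < 10 ^ len0 :=
    (Nat.length_toDigits_le_iff (by norm_num) hlpos).1 (le_refl _)
  have hnlt2h : nn < 100 ^ h := by
    rw [pow100_eq]
    calc nn < 10 ^ len0 := hnlt
    _ ≤ 10 ^ (2 * h) := Nat.pow_le_pow_right (by norm_num) (by omega)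
  have hpadded : (if (PySem.Int.toChars n).length % 2 ≠ 0
        then '0' :: PySem.Int.toChars n else PySem.Int.toChars n) = padK (2 * h) nn := by
    rw [hchars]
    have hpk : padK (2 * h) nn
        = List.replicate (2 * h - len0) '0' ++ Nat.toDigits 10 nn := by
      rw [toDigits_padK (2 * h) nn (by omega) (by rw [← pow100_eq]; exact hnlt2h)]
    by_cases hodd : len0 % 2 = 0
    · have h2h : 2 * h = len0 := by omega
      rw [if_neg (by omega), hpk, h2h]
      simp
    · have h2h : 2 * h = len0 + 1 := by omega
      rw [if_pos (by omega), hpk, h2h]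
      have : len0 + 1 - len0 = 1 := by omega
      rw [this]
      rfl
  simp only [hpadded]
  set d := (p + 3).toNat with hdd
  have hdint : (d : Int) = p + 3 := by omega
  have hstart : pvLoopA d ['0'] 0 (padK (2 * h) nn) p
      = '0' :: padK d (Nat.sqrt (NkFun nn h d)) := by
    have h0 : NkFun nn h 0 = 0 := by
      unfold NkFun
      rw [if_pos (by omega)]
      simp only [Nat.sub_zero]
      exact Nat.div_eq_of_lt hnlt2h
    have hinv := pvLoopA_inv p nn h hnlt2h d hdint d 0 (by omega)
    rw [h0] at hinv
    simp only [Nat.sqrt_zero, padK] at hinv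
    have hmod : nn % 100 ^ (h - 0) = nn := by
      rw [Nat.sub_zero]
      exact Nat.mod_eq_of_lt hnlt2h
    rw [hmod] at hinv
    simpa using hinv
  rw [hstart]
  simp

-- ==== B side: the digit-doubling integer square root ====

theorem sqrt4 (m : Nat) :
    Nat.sqrt m = (if (2 * Nat.sqrt (m / 4) + 1) * (2 * Nat.sqrt (m / 4) + 1) ≤ m
                  then 2 * Nat.sqrt (m / 4) + 1 else 2 * Nat.sqrt (m / 4)) := by
  generalize hs : Nat.sqrt (m / 4) = s
  have hs2 : s ^ 2 ≤ m / 4 := hs ▸ Nat.sqrt_le' (m / 4)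
  have hlt : m / 4 < (s + 1) ^ 2 := hs ▸ Nat.lt_succ_sqrt' (m / 4)
  have hdm : 4 * (m / 4) + m % 4 = m := by omega
  have hm4 : m % 4 < 4 := Nat.mod_lt _ (by norm_num)
  have hss : s * s ≤ m / 4 := by nlinarith
  have hlower : 2 * s ≤ Nat.sqrt m := by
    rw [Nat.le_sqrt]
    calc 2 * s * (2 * s) = 4 * (s * s) := by ring
    _ ≤ 4 * (m / 4) := Nat.mul_le_mul_left _ hss
    _ ≤ m := by omega
  have h1 : m / 4 + 1 ≤ (s + 1) * (s + 1) := by nlinarith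
  have hupper : Nat.sqrt m < 2 * s + 2 := by
    rw [Nat.sqrt_lt]
    calc m < 4 * (m / 4 + 1) := by omega
    _ ≤ 4 * ((s + 1) * (s + 1)) := Nat.mul_le_mul_left _ h1
    _ = (2 * s + 2) * (2 * s + 2) := by ring
  split
  · rename_i hcond
    have : 2 * s + 1 ≤ Nat.sqrt m := by
      rw [Nat.le_sqrt]
      exact hcond
    omega
  · rename_i hcond
    have : Nat.sqrt m < 2 * s + 1 := by
      rw [Nat.sqrt_lt]
      exact Nat.lt_of_not_le hcond
    omega

theorem pvShiftsB_fold : ∀ (mm : Nat) (m : Int), 0 ≤ m → m.toNat = mm →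
    (pvShiftsB m).1.reverse.foldl pvIsqrtStep (pvShiftsB m).2 = (Nat.sqrt m.toNat : Int) := by
  intro mm
  induction mm using Nat.strong_induction_on with
  | _ mm ih =>
  intro m hm hind
  subst hind
  by_cases h2 : 2 ≤ m
  · have h4 : m >>> (2:Nat) = m / 4 := by
      have := Int.shiftRight_eq_div_pow m 2
      norm_num at this
      exact this
    have hq0 : 0 ≤ m / 4 := Int.ediv_nonneg hm (by norm_num)
    have hqtoNat : (m / 4).toNat = m.toNat / 4 := by omega
    have hlt : (m / 4).toNat < m.toNat := by omega
    rw [pvShiftsB, dif_pos h2]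
    simp only [List.reverse_cons, List.foldl_append, List.foldl_cons, List.foldl_nil]
    rw [h4, ih (m / 4).toNat hlt (m / 4) hq0 rfl]
    simp only [pvIsqrtStep, Int.shiftLeft_eq, pow_one, hqtoNat]
    set s := Nat.sqrt (m.toNat / 4) with hs
    have hms : m = (m.toNat : Int) := by omega
    rw [sqrt4 m.toNat, ← hs]
    have hcast : ((s : Int) * 2 + 1) * ((s : Int) * 2 + 1) = (((2 * s + 1) * (2 * s + 1) : Nat) : Int) := by
      push_cast; ring
    by_cases hcond : (2 * s + 1) * (2 * s + 1) ≤ m.toNat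
    · rw [if_pos (by rw [hcast, hms]; exact_mod_cast hcond), if_pos hcond]
      push_cast
      ring
    · rw [if_neg (by rw [hcast, hms]; intro hx; exact hcond (by exact_mod_cast hx)), if_neg hcond]
      push_cast
      ring
  · rw [pvShiftsB, dif_neg h2]
    simp only [List.reverse_nil, List.foldl_nil]
    have : m = 0 ∨ m = 1 := by omega
    rcases this with h | h <;> subst h <;> decide

-- ==== B side assembled ====

theorem fdiv_of_nonneg_right (a b : Int) (hb : 0 ≤ b) : a.fdiv b = a / b := by
  rw [Int.fdiv_eq_ediv]
  simp [hb]

theorem longRoot_alt_eq (n p : Int) (hn : 0 ≤ n) (hp : 1 ≤ p + 3) :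
    longRoot_alt n p = String.ofList (padK (p + 3).toNat
      (Nat.sqrt (NkFun n.toNat (((Nat.toDigits 10 n.toNat).length + 1) / 2) (p + 3).toNat))) := by
  unfold longRoot_alt
  rw [if_neg (by omega)]
  set nn := n.toNat with hnn
  have hchars : (PySem.Int.toStr n).toList = Nat.toDigits 10 nn := by
    rw [PySem.Int.toList_toStr]
    unfold PySem.Int.toChars
    rw [if_neg (by omega)]
  set len0 := (Nat.toDigits 10 nn).length with hlen0
  have hlpos : 0 < len0 := Nat.length_toDigits_pos
  set h := (len0 + 1) / 2 with hh
  have hdig : PySem.Str.len (PySem.Int.toStr n) = (len0 : Int) := by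
    rw [PySem.Str.len_eq, hchars]
  simp only [hdig]
  have hhalf : PySem.Int.floordiv ((len0 : Int) + 1) 2 = (h : Int) := by
    unfold PySem.Int.floordiv
    rw [show ((len0 : Int) + 1) = ((len0 + 1 : Nat) : Int) by push_cast; ring]
    rw [fdiv_of_nonneg_right _ _ (by norm_num)]
    rw [hh]
    omega
  simp only [hhalf]
  set d := (p + 3).toNat with hdd
  have hdint : (d : Int) = p + 3 := by omega
  have hnlt : nn < 10 ^ len0 :=
    (Nat.length_toDigits_le_iff (by norm_num) hlpos).1 (le_refl _)
  have hnlt2h : nn < 100 ^ h := by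
    rw [pow100_eq]
    calc nn < 10 ^ len0 := hnlt
    _ ≤ 10 ^ (2 * h) := Nat.pow_le_pow_right (by norm_num) (by omega)
  have hNval : (if (h : Int) ≤ p + 3 then n * 100 ^ (p + 3 - (h : Int)).toNat
        else PySem.Int.floordiv n (100 ^ ((h : Int) - (p + 3)).toNat))
      = ((NkFun nn h d : Nat) : Int) := by
    unfold NkFun
    by_cases hhd : (h : Int) ≤ p + 3
    · rw [if_pos hhd]
      by_cases hdh : d ≤ h
      · rw [if_pos hdh]
        rw [show (p + 3 - (h : Int)).toNat = 0 by omega, pow_zero, mul_one]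
        rw [show h - d = 0 by omega, pow_zero, Nat.div_one]
        omega
      · rw [if_neg hdh]
        rw [show (p + 3 - (h : Int)).toNat = d - h by omega]
        push_cast
        rw [show n = ((nn : ℕ) : Int) from by omega]
    · rw [if_neg hhd]
      have hdh : d ≤ h := by omega
      rw [if_pos hdh]
      unfold PySem.Int.floordiv
      rw [show ((h : Int) - (p + 3)).toNat = h - d by omega]
      rw [show ((100:Int) ^ (h - d)) = (((100 ^ (h - d) : Nat)) : Int) by push_cast; ring]
      rw [fdiv_of_nonneg_right _ _ (by positivity)]
      rw [show n = ((nn : Nat) : Int) by omega]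
      exact (Int.natCast_div nn (100 ^ (h - d))).symm
  simp only [hNval]
  set R := Nat.sqrt (NkFun nn h d) with hR
  have hsq : pvIsqrtB ((NkFun nn h d : Nat) : Int) = (R : Int) := by
    unfold pvIsqrtB
    rw [pvShiftsB_fold ((((NkFun nn h d : Nat) : Int)).toNat) _ (Int.natCast_nonneg _) rfl]
    simp [hR]
  simp only [hsq]
  have hRlt : R < 10 ^ d := sqrt_lt_of_lt_sq _ d (Nk_lt nn h d hnlt2h)
  have hTR : (PySem.Int.toStr (R : Int)).toList = Nat.toDigits 10 R := by
    rw [PySem.Int.toList_toStr]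
    unfold PySem.Int.toChars
    rw [if_neg (by omega)]
    simp
  have hlenR : (Nat.toDigits 10 R).length ≤ d := length_toDigits_le R d (by omega) hRlt
  have hzfill : PySem.Str.zfill (PySem.Int.toStr (R : Int)) (p + 3) = String.ofList (padK d R) := by
    rw [show PySem.Str.zfill (PySem.Int.toStr (R : Int)) (p + 3)
        = String.ofList ((PySem.Str.zfill (PySem.Int.toStr (R : Int)) (p + 3)).toList)
        from (String.ofList_toList).symm]
    rw [PySem.Str.toList_zfill, hTR]
    congr 1
    have hpadK : padK d R = List.replicate (d - (Nat.toDigits 10 R).length) '0' ++ Nat.toDigits 10 R :=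
      toDigits_padK d R (by omega) hRlt
    unfold PySem.Chars.zfill
    by_cases hle : p + 3 ≤ ((Nat.toDigits 10 R).length : Int)
    · rw [if_pos hle]
      rw [hpadK, show d = (Nat.toDigits 10 R).length by omega]
      simp
    · rw [if_neg hle]
      obtain ⟨c, rest, hcr⟩ : ∃ c rest, Nat.toDigits 10 R = c :: rest := by
        cases hx : Nat.toDigits 10 R with
        | nil => exact absurd (hx ▸ @Nat.length_toDigits_pos 10 R) (by simp)
        | cons c rest => exact ⟨c, rest, rfl⟩
      rw [hcr]
      change (if c = '+' ∨ c = '-' then _ else _) = _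
      have hmemc : c ∈ Nat.toDigits 10 R := by rw [hcr]; exact List.mem_cons_self ..
      have hdigc : c.isDigit := Nat.isDigit_of_mem_toDigits (by norm_num) (by norm_num) hmemc
      have hnotsign : ¬ (c = '+' ∨ c = '-') := by
        unfold Char.isDigit at hdigc
        rintro (rfl | rfl) <;> simp_all
      rw [if_neg hnotsign, hpadK, hcr, ← hdd]
  exact hzfill

-- ===== VERDICT (by name: the statement is the Claim_ definition above) =====
theorem longRoot_spec : Claim_equal_longRoot := by
  intro n p _ hpre
  unfold Spec_longRoot
  by_cases hn : 0 ≤ n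
  · by_cases hp : 1 ≤ p + 3
    · rw [longRoot_eq_pad n p hn (by omega), longRoot_alt_eq n p hn hp]
    · have hz : (p + 3).toNat = 0 := by omega
      unfold longRoot longRoot_alt
      rw [hz, if_pos (by omega)]
      rfl
  · have hp : p + 3 < 1 := by
      rcases hpre with h | h
      · exact absurd h hn
      · exact h
    have hz : (p + 3).toNat = 0 := by omega
    unfold longRoot longRoot_alt
    rw [hz, if_pos (by omega)]
    rfl
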